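-- pv_equiv track=rewrite | github.com/anthonyrawlins/hive | backend/app/services/capability_detector.py | determine_agent_specialty
-- ===== SOURCE A (Python) =====
-- from typing import Dict, List, Set, Optional, Tuple
-- from enum import Enum
--
-- class ModelCapability(str, Enum):
--     """Model capability categories based on model characteristics"""
--     CODE_GENERATION = "code_generation"
--     CODE_REVIEW = "code_review"
--     REASONING = "reasoning"
--     DOCUMENTATION = "documentation"
--     TESTING = "testing"
--     VISUAL_ANALYSIS = "visual_analysis"
--     GENERAL_AI = "general_ai"
--     KERNEL_DEV = "kernel_dev"
--     PYTORCH_DEV = "pytorch_dev"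
--     PROFILER = "profiler"
--
-- class AgentSpecialty(str, Enum):
--     """Dynamic agent specializations based on model capabilities"""
--     ADVANCED_CODING = "advanced_coding"      # starcoder2, deepseek-coder-v2, devstral
--     REASONING_ANALYSIS = "reasoning_analysis" # phi4-reasoning, granite3-dense
--     CODE_REVIEW_DOCS = "code_review_docs"    # codellama, qwen2.5-coder
--     GENERAL_AI = "general_ai"                # llama3, gemma, mistral
--     MULTIMODAL = "multimodal"                # llava, vision models
--     LIGHTWEIGHT = "lightweight"             # small models < 8B
--
-- SPECIALTY_MAPPING = {
--     frozenset([ModelCapability.CODE_GENERATION, ModelCapability.KERNEL_DEV]): AgentSpecialty.ADVANCED_CODING,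
--     frozenset([ModelCapability.CODE_GENERATION, ModelCapability.PROFILER]): AgentSpecialty.ADVANCED_CODING,
--     frozenset([ModelCapability.REASONING, ModelCapability.PROFILER]): AgentSpecialty.REASONING_ANALYSIS,
--     frozenset([ModelCapability.REASONING, ModelCapability.PYTORCH_DEV]): AgentSpecialty.REASONING_ANALYSIS,
--     frozenset([ModelCapability.CODE_REVIEW, ModelCapability.DOCUMENTATION]): AgentSpecialty.CODE_REVIEW_DOCS,
--     frozenset([ModelCapability.VISUAL_ANALYSIS]): AgentSpecialty.MULTIMODAL,
-- }
--
-- def determine_agent_specialty(all_capabilities: List[ModelCapability]) -> AgentSpecialty: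
--     """Determine agent specialty based on combined model capabilities"""
--     capability_set = frozenset(all_capabilities)
--
--     # Check for exact specialty matches
--     for caps, specialty in SPECIALTY_MAPPING.items():
--         if caps.issubset(capability_set):
--             return specialty
--
--     # Fallback logic based on dominant capabilities
--     if ModelCapability.CODE_GENERATION in all_capabilities:
--         if ModelCapability.REASONING in all_capabilities:
--             return AgentSpecialty.ADVANCED_CODING
--         elif ModelCapability.CODE_REVIEW in all_capabilities:
--             return AgentSpecialty.CODE_REVIEW_DOCS
--         else:
--             return AgentSpecialty.ADVANCED_CODING
--
--     elif ModelCapability.REASONING in all_capabilities: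
--         return AgentSpecialty.REASONING_ANALYSIS
--
--     elif ModelCapability.VISUAL_ANALYSIS in all_capabilities:
--         return AgentSpecialty.MULTIMODAL
--
--     else:
--         return AgentSpecialty.GENERAL_AI
-- ===== SOURCE B (Python) =====
-- def determine_agent_specialty(all_capabilities):
--     """Decision tree over membership flags; no mapping table, no subset loop."""
--     s = set(all_capabilities)
--     cg = "code_generation" in s
--     reas = "reasoning" in s
--     if cg and ("kernel_dev" in s or "profiler" in s):
--         return "advanced_coding"
--     if reas and ("profiler" in s or "pytorch_dev" in s):
--         return "reasoning_analysis"
--     if "code_review" in s and "documentation" in s: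
--         return "code_review_docs"
--     if "visual_analysis" in s:
--         return "multimodal"
--     if cg:
--         return "code_review_docs" if (not reas and "code_review" in s) else "advanced_coding"
--     return "reasoning_analysis" if reas else "general_ai"
-- ===== Notes on version B (the rewrite author's own statement) =====
-- stated objective: simpler
-- what changed: Replaced the SPECIALTY_MAPPING frozenset table and its subset-scanning loop by precomputed membership flags and an explicit decision tree reproducing the table's precedence.
import Mathlib
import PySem

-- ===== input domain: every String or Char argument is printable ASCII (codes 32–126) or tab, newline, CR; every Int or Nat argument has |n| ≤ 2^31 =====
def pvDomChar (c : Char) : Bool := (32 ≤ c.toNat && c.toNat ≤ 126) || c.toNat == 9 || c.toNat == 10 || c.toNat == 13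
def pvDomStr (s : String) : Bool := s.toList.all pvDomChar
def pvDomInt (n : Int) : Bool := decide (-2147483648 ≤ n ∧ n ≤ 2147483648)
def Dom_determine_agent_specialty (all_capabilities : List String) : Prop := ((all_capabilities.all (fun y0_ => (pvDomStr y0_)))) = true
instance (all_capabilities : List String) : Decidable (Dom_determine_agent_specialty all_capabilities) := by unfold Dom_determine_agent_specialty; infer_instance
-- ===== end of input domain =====

-- B replaces the frozenset mapping table and subset loop by membership flags and a decision tree (simpler; return value only).

-- ===== PORT A =====
-- SPECIALTY_MAPPING, in dict insertion order (frozensets as their literal element lists; subset test is elementwise membership)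
def pvSpecialtyMapping : List (List String × String) :=
  [(["code_generation", "kernel_dev"], "advanced_coding"),
   (["code_generation", "profiler"], "advanced_coding"),
   (["reasoning", "profiler"], "reasoning_analysis"),
   (["reasoning", "pytorch_dev"], "reasoning_analysis"),
   (["code_review", "documentation"], "code_review_docs"),
   (["visual_analysis"], "multimodal")]

-- the 'for caps, specialty in SPECIALTY_MAPPING.items(): if caps.issubset(...)' loop with early return
def pvScanMapping (capability_set : PySem.Set String) : List (List String × String) → Option String
  | [] => none
  | (caps, specialty) :: rest =>
      if PySem.Set.issubset caps capability_set then some specialty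
      else pvScanMapping capability_set rest

def determine_agent_specialty (all_capabilities : List String) : String :=
  let capability_set := PySem.Set.ofList all_capabilities
  match pvScanMapping capability_set pvSpecialtyMapping with
  | some specialty => specialty
  | none =>
    if all_capabilities.contains "code_generation" then
      if all_capabilities.contains "reasoning" then "advanced_coding"
      else if all_capabilities.contains "code_review" then "code_review_docs"
      else "advanced_coding"
    else if all_capabilities.contains "reasoning" then "reasoning_analysis"
    else if all_capabilities.contains "visual_analysis" then "multimodal"
    else "general_ai"

-- ===== PORT B =====
def determine_agent_specialty_alt (all_capabilities : List String) : String :=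
  let s := PySem.Set.ofList all_capabilities
  let cg := PySem.Set.contains s "code_generation"
  let reas := PySem.Set.contains s "reasoning"
  if cg && (PySem.Set.contains s "kernel_dev" || PySem.Set.contains s "profiler") then
    "advanced_coding"
  else if reas && (PySem.Set.contains s "profiler" || PySem.Set.contains s "pytorch_dev") then
    "reasoning_analysis"
  else if PySem.Set.contains s "code_review" && PySem.Set.contains s "documentation" then
    "code_review_docs"
  else if PySem.Set.contains s "visual_analysis" then
    "multimodal"
  else if cg then
    (if !reas && PySem.Set.contains s "code_review" then "code_review_docs" else "advanced_coding")
  else if reas then "reasoning_analysis"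
  else "general_ai"

-- ===== PRECONDITION & SPEC =====
def Spec_determine_agent_specialty (all_capabilities : List String) (out : String) : Prop := out = determine_agent_specialty_alt all_capabilities
instance (all_capabilities : List String) (out : String) : Decidable (Spec_determine_agent_specialty all_capabilities out) := by unfold Spec_determine_agent_specialty; infer_instance

-- ===== CLAIM (what is proved, stated in full; the proofs are below) =====
def Claim_equal_determine_agent_specialty : Prop := ∀ (all_capabilities : List String), Dom_determine_agent_specialty all_capabilities → Spec_determine_agent_specialty all_capabilities (determine_agent_specialty all_capabilities)

-- ===== LEMMAS AND PROOFS =====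

-- membership in set(xs) is membership in xs
theorem pv_ofList_contains (l : List String) (c : String) :
    PySem.Set.contains (PySem.Set.ofList l) c = l.contains c := by
  rw [Bool.eq_iff_iff]
  simp [PySem.Set.mem_ofList]

theorem pv_issubset_pair (a b : String) (l : List String) :
    PySem.Set.issubset [a, b] (PySem.Set.ofList l) = (l.contains a && l.contains b) := by
  rw [Bool.eq_iff_iff]
  simp [PySem.Set.issubset_iff, PySem.Set.mem_ofList]

theorem pv_issubset_single (a : String) (l : List String) :
    PySem.Set.issubset [a] (PySem.Set.ofList l) = l.contains a := by
  rw [Bool.eq_iff_iff]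
  simp [PySem.Set.issubset_iff, PySem.Set.mem_ofList]

-- ===== VERDICT (by name: the statement is the Claim_ definition above) =====
theorem determine_agent_specialty_spec : Claim_equal_determine_agent_specialty := by
  intro l _
  unfold Spec_determine_agent_specialty determine_agent_specialty determine_agent_specialty_alt
  simp only [pvSpecialtyMapping, pvScanMapping, pv_issubset_pair, pv_issubset_single,
    pv_ofList_contains]
  by_cases h1 : "code_generation" ∈ l <;>
  by_cases h2 : "kernel_dev" ∈ l <;>
  by_cases h3 : "profiler" ∈ l <;>
  by_cases h4 : "reasoning" ∈ l <;>
  by_cases h5 : "pytorch_dev" ∈ l <;>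
  by_cases h6 : "code_review" ∈ l <;>
  by_cases h7 : "documentation" ∈ l <;>
  by_cases h8 : "visual_analysis" ∈ l <;>
  simp [h1, h2, h3, h4, h5, h6, h7, h8]
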